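-- pv_equiv track=rewrite | github.com/violet-autumn/dsa | blind-75/02.. two sum.py | retunIndex
-- ===== SOURCE A (Python) =====
-- from typing import List
--
-- def retunIndex(nums: List[int], num1: int, num2: int) -> List[int]:
--     i = 0
--     index1 = 0
--     index2 = 0
--     for number in nums:
--         if number == num1:
--             index1 = i
--         i = i + 1
--
--     i = 0
--     for number in nums:
--         if number == num2 and i != index1:
--             index2 = i
--         i = i + 1
--     return [index1, index2]
-- ===== SOURCE B (Python) =====
-- from typing import List
--
-- def retunIndex(nums: List[int], num1: int, num2: int) -> List[int]:
--     # One pass builds, per value, its last and second-to-last occurrence index;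
--     # the answers are then plain dictionary lookups (no second scan of nums).
--     last = {}
--     prev = {}
--     for i, v in enumerate(nums):
--         if v in last:
--             prev[v] = last[v]
--         last[v] = i
--     index1 = last.get(num1, 0)
--     j = last.get(num2)
--     if j is None:
--         index2 = 0
--     elif j != index1:
--         index2 = j
--     else:
--         index2 = prev.get(num2, 0)
--     return [index1, index2]
-- ===== Notes on version B (the rewrite author's own statement) =====
-- stated objective: alternative
-- what changed: Replaces A's two staged full scans (the second one re-scanning nums while excluding index1) by a single pass that builds a hash index of each value's last and second-to-last occurrence, after which both answers are O(1) dictionary lookups.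
import Mathlib
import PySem

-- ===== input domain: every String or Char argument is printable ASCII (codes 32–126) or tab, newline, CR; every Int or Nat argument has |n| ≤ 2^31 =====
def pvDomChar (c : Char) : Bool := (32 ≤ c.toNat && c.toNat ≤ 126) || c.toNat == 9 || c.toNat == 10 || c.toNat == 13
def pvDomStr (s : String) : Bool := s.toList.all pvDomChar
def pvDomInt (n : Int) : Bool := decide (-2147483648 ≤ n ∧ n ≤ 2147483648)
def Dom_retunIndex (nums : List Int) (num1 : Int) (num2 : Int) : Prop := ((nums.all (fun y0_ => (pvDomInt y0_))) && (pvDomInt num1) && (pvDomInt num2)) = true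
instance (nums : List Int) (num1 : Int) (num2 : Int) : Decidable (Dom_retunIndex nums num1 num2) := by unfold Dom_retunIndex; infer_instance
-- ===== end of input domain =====

-- B replaces A's two staged full scans by a single pass building a hash index of each
-- value's last and second-to-last occurrence, then answers by dictionary lookups.

-- ===== PORT A =====
-- first loop: overwrite index1 with i whenever number == num1
def loopA1 (num1 : Int) : List Int → Nat → Int → Int
  | [], _, index1 => index1
  | number :: rest, i, index1 =>
      loopA1 num1 rest (i + 1) (if number = num1 then (i : Int) else index1)

-- second loop: overwrite index2 with i whenever number == num2 and i != index1
def loopA2 (num2 : Int) (index1 : Int) : List Int → Nat → Int → Int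
  | [], _, index2 => index2
  | number :: rest, i, index2 =>
      loopA2 num2 index1 rest (i + 1)
        (if number = num2 ∧ (i : Int) ≠ index1 then (i : Int) else index2)

def retunIndex (nums : List Int) (num1 : Int) (num2 : Int) : List Int :=
  let index1 := loopA1 num1 nums 0 0
  let index2 := loopA2 num2 index1 nums 0 0
  [index1, index2]

-- ===== PORT B =====
-- the single pass: for i, v in enumerate(nums): if v in last: prev[v] = last[v]; last[v] = i
def buildLP : List Int → Nat → PySem.Dict Int Int → PySem.Dict Int Int →
    PySem.Dict Int Int × PySem.Dict Int Int
  | [], _, last, prev => (last, prev)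
  | v :: rest, i, last, prev =>
      let prev' := match last.get? v with
        | some j => prev.insert v j
        | none => prev
      buildLP rest (i + 1) (last.insert v (i : Int)) prev'

def retunIndex_alt (nums : List Int) (num1 : Int) (num2 : Int) : List Int :=
  let lp := buildLP nums 0 PySem.Dict.empty PySem.Dict.empty
  let index1 := (lp.1.get? num1).getD 0
  let index2 := match lp.1.get? num2 with
    | none => 0
    | some j => if j ≠ index1 then j else (lp.2.get? num2).getD 0
  [index1, index2]

-- ===== PRECONDITION & SPEC =====
def Spec_retunIndex (nums : List Int) (num1 : Int) (num2 : Int) (out : List Int) : Prop := out = retunIndex_alt nums num1 num2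
instance (nums : List Int) (num1 : Int) (num2 : Int) (out : List Int) : Decidable (Spec_retunIndex nums num1 num2 out) := by unfold Spec_retunIndex; infer_instance

-- ===== CLAIM =====
def Claim_equal_retunIndex : Prop := ∀ (nums : List Int) (num1 : Int) (num2 : Int), Dom_retunIndex nums num1 num2 → Spec_retunIndex nums num1 num2 (retunIndex nums num1 num2)

-- ===== LEMMAS AND PROOFS =====

theorem loopA1_append (x a : Int) (l : List Int) (i : Nat) (acc : Int) :
    loopA1 x (l ++ [a]) i acc
      = if a = x then ((i + l.length : Nat) : Int) else loopA1 x l i acc := by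
  induction l generalizing i acc with
  | nil => simp [loopA1]
  | cons b l ih =>
      simp only [List.cons_append, loopA1, ih]
      have : i + 1 + l.length = i + (b :: l).length := by simp; omega
      rw [this]

theorem loopA2_append (x idx a : Int) (l : List Int) (i : Nat) (acc : Int) :
    loopA2 x idx (l ++ [a]) i acc
      = if a = x ∧ ((i + l.length : Nat) : Int) ≠ idx then ((i + l.length : Nat) : Int)
        else loopA2 x idx l i acc := by
  induction l generalizing i acc with
  | nil => simp [loopA2]
  | cons b l ih =>
      simp only [List.cons_append, loopA2, ih]
      have : i + 1 + l.length = i + (b :: l).length := by simp; omega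
      rw [this]

theorem buildLP_append (a : Int) (l : List Int) (i : Nat)
    (last prev : PySem.Dict Int Int) :
    buildLP (l ++ [a]) i last prev
      = ((buildLP l i last prev).1.insert a ((i + l.length : Nat) : Int),
         match (buildLP l i last prev).1.get? a with
         | some j => (buildLP l i last prev).2.insert a j
         | none => (buildLP l i last prev).2) := by
  induction l generalizing i last prev with
  | nil => simp [buildLP]
  | cons b l ih =>
      simp only [List.cons_append, buildLP, ih]
      have : i + 1 + l.length = i + (b :: l).length := by simp; omega
      rw [this]

-- every index stored in the `last` dict of buildLP l 0 ∅ ∅ is < l.length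
theorem buildLP_last_bound (l : List Int) (x j : Int)
    (h : (buildLP l 0 PySem.Dict.empty PySem.Dict.empty).1.get? x = some j) :
    j < (l.length : Int) := by
  induction l using List.reverseRecOn generalizing x j with
  | nil => simp [buildLP, PySem.Dict.get?_empty] at h
  | append_singleton l a ih =>
      rw [buildLP_append] at h
      rw [PySem.Dict.get?_insert] at h
      simp only [List.length_append, List.length_cons, List.length_nil]
      by_cases hx : x = a
      · simp [hx] at h
        omega
      · simp [hx] at h
        have := ih x j h
        push_cast
        omega

-- if a value never occurred (`last` has no entry), `prev` has no entry either
theorem buildLP_prev_none (l : List Int) (x : Int)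
    (h : (buildLP l 0 PySem.Dict.empty PySem.Dict.empty).1.get? x = none) :
    (buildLP l 0 PySem.Dict.empty PySem.Dict.empty).2.get? x = none := by
  induction l using List.reverseRecOn generalizing x with
  | nil => simp [buildLP, PySem.Dict.get?_empty]
  | append_singleton l a ih =>
      rw [buildLP_append] at h ⊢
      rw [PySem.Dict.get?_insert] at h
      by_cases hx : x = a
      · simp [hx] at h
      · simp only [hx, if_false] at h
        cases hL : (buildLP l 0 PySem.Dict.empty PySem.Dict.empty).1.get? a with
        | none => simpa using ih x h
        | some j =>
            simp only [hL]
            rw [PySem.Dict.get?_insert]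
            simp only [hx, if_false]
            exact ih x h

-- the `last` lookup computes A's first loop
theorem buildLP_eq_loopA1 (l : List Int) (x : Int) :
    ((buildLP l 0 PySem.Dict.empty PySem.Dict.empty).1.get? x).getD 0
      = loopA1 x l 0 0 := by
  induction l using List.reverseRecOn generalizing x with
  | nil => simp [buildLP, loopA1, PySem.Dict.get?_empty]
  | append_singleton l a ih =>
      rw [buildLP_append, loopA1_append, PySem.Dict.get?_insert]
      by_cases hx : x = a
      · simp [hx]
      · have hx' : ¬ a = x := fun h => hx h.symm
        simp [hx, hx', ih]

-- the last/prev lookups compute A's second loop, for ANY exclusion index idx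
theorem buildLP_eq_loopA2 (l : List Int) (x idx : Int) :
    (match (buildLP l 0 PySem.Dict.empty PySem.Dict.empty).1.get? x with
     | none => 0
     | some j => if j ≠ idx then j
                 else ((buildLP l 0 PySem.Dict.empty PySem.Dict.empty).2.get? x).getD 0)
      = loopA2 x idx l 0 0 := by
  induction l using List.reverseRecOn generalizing x idx with
  | nil => simp [buildLP, loopA2, PySem.Dict.get?_empty]
  | append_singleton l a ih =>
      rw [buildLP_append, loopA2_append, PySem.Dict.get?_insert]
      by_cases hx : x = a
      · subst hx
        simp only [if_pos rfl, Nat.zero_add]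
        by_cases hidx : ((l.length : Nat) : Int) = idx
        · simp only [hidx, ne_eq, not_true_eq_false, ite_false, and_false]
          rw [← ih x idx]
          cases hL : (buildLP l 0 PySem.Dict.empty PySem.Dict.empty).1.get? x with
          | none =>
              simp [buildLP_prev_none l x hL]
          | some j =>
              have hj : j < (l.length : Int) := buildLP_last_bound l x j hL
              have hjne : j ≠ idx := by rw [← hidx]; omega
              simp [hL, hjne]
        · simp [hidx]
      · have hx' : ¬ a = x := fun h => hx h.symm
        simp only [hx, if_false, hx', false_and, ite_false]
        rw [← ih x idx]
        cases hL : (buildLP l 0 PySem.Dict.empty PySem.Dict.empty).1.get? a with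
        | none => simp
        | some j =>
            rw [PySem.Dict.get?_insert]
            simp [hx]

-- ===== VERDICT =====
theorem retunIndex_spec : Claim_equal_retunIndex := by
  intro nums num1 num2 _
  show [loopA1 num1 nums 0 0, loopA2 num2 (loopA1 num1 nums 0 0) nums 0 0]
      = [((buildLP nums 0 PySem.Dict.empty PySem.Dict.empty).1.get? num1).getD 0,
         match (buildLP nums 0 PySem.Dict.empty PySem.Dict.empty).1.get? num2 with
         | none => 0
         | some j => if j ≠ ((buildLP nums 0 PySem.Dict.empty PySem.Dict.empty).1.get? num1).getD 0 then j
                     else ((buildLP nums 0 PySem.Dict.empty PySem.Dict.empty).2.get? num2).getD 0]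
  rw [buildLP_eq_loopA1, buildLP_eq_loopA2]
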